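-- pv_equiv track=rewrite | github.com/AliSta12/projekt_semestralny-I | fasta_parser.py | _normalize_sequence_line
-- ===== SOURCE A (Python) =====
-- def _normalize_sequence_line(line: str) -> str:
--     seq_line = line.upper()
--     seq_line = seq_line.replace("U", "T")
--     seq_line = seq_line.replace("-", "").replace(".", "")
--     seq_line = seq_line.replace("?", "N")
--     seq_line = seq_line.replace(" ", "").replace("\t", "")
--     seq_line = "".join(char for char in seq_line if not char.isdigit())
--     return seq_line
-- ===== SOURCE B (Python) =====
-- _DROP = set("-. \t")
-- _MAP = {"U": "T", "?": "N"}
--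
--
-- def _normalize_sequence_line(line: str) -> str:
--     # one table-driven pass over the uppercased line instead of five scans
--     return "".join(
--         _MAP.get(ch, ch)
--         for ch in line.upper()
--         if ch not in _DROP and not ch.isdigit()
--     )
-- ===== Notes on version B (the rewrite author's own statement) =====
-- stated objective: alternative
-- what changed: Replaced A's six sequential full-string replace() scans plus a final filtering join by a single table-driven pass over the uppercased string (set of dropped chars + dict of substitutions inside one comprehension); it trades C-level replace scans for one Python-level pass.
import Mathlib
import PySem

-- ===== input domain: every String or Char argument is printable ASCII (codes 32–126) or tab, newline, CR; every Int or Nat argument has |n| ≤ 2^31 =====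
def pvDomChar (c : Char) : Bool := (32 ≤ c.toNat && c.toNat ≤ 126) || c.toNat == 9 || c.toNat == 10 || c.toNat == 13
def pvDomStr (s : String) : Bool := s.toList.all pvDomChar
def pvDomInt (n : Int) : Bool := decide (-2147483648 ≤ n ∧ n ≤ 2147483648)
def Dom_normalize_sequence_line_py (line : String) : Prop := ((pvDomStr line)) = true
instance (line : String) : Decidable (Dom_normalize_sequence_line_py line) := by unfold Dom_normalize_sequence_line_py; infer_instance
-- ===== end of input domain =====

-- B collapses A's six sequential replace() scans and the final digit-filtering join
-- into one table-driven pass over the uppercased line (alternative decomposition, same cost).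


-- ===== PORT A =====
def normalize_sequence_line_py (line : String) : String :=
  let s1 := PySem.Str.upper line
  let s2 := PySem.Str.replace s1 "U" "T"
  let s3 := PySem.Str.replace (PySem.Str.replace s2 "-" "") "." ""
  let s4 := PySem.Str.replace s3 "?" "N"
  let s5 := PySem.Str.replace (PySem.Str.replace s4 " " "") "\t" ""
  PySem.Str.join ""
    ((s5.toList.filter (fun c => !PySem.Chars.isdigit c)).map (fun c => String.ofList [c]))

-- ===== PORT B =====
def pvDropSet : PySem.Set Char := PySem.Set.ofList "-. \t".toList
def pvMapTbl : PySem.Dict Char Char := (PySem.Dict.empty.insert 'U' 'T').insert '?' 'N'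

def normalize_sequence_line_py_alt (line : String) : String :=
  PySem.Str.join ""
    (((PySem.Str.upper line).toList.filter
        (fun c => !pvDropSet.contains c && !PySem.Chars.isdigit c)).map
      (fun c => String.ofList [pvMapTbl.getD c c]))

-- ===== PRECONDITION & SPEC =====
def Spec_normalize_sequence_line_py (line : String) (out : String) : Prop := out = normalize_sequence_line_py_alt line
instance (line : String) (out : String) : Decidable (Spec_normalize_sequence_line_py line out) := by unfold Spec_normalize_sequence_line_py; infer_instance

-- ===== CLAIM (what is proved, stated in full; the proofs are below) =====
def Claim_equal_normalize_sequence_line_py : Prop := ∀ (line : String), Dom_normalize_sequence_line_py line → Spec_normalize_sequence_line_py line (normalize_sequence_line_py line)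

-- ===== LEMMAS AND PROOFS =====

-- replace with a single-character pattern acts characterwise
theorem pv_go_single (u : Char) (new : List Char) :
    ∀ (l acc : List Char) (fuel : Nat), l.length ≤ fuel →
      PySem.Chars.replace.go [u] new fuel l acc
        = acc.reverse ++ l.flatMap (fun c => if c = u then new else [c]) := by
  intro l
  induction l with
  | nil =>
    intro acc fuel _
    cases fuel <;> simp [PySem.Chars.replace.go]
  | cons c t ih =>
    intro acc fuel h
    cases fuel with
    | zero => simp at h
    | succ f =>
      rw [PySem.Chars.replace.go]
      by_cases hc : c = u
      · subst hc
        simp [List.isPrefixOf, ih _ f (by simpa using h)]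
      · simp [List.isPrefixOf, Ne.symm hc, hc, ih _ f (by simpa using h)]

theorem pv_replace_single (u : Char) (new : List Char) (cs : List Char) :
    PySem.Chars.replace cs [u] new = cs.flatMap (fun c => if c = u then new else [c]) := by
  simpa [PySem.Chars.replace] using pv_go_single u new cs [] cs.length le_rfl

-- per-character agreement of the two pipelines
theorem pv_step (c : Char) :
    ((((((if c = 'U' then ['T'] else [c]).flatMap (fun c => if c = '-' then [] else [c])).flatMap
          (fun c => if c = '.' then [] else [c])).flatMap
          (fun c => if c = '?' then ['N'] else [c])).flatMap
          (fun c => if c = ' ' then [] else [c])).flatMap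
          (fun c => if c = '\t' then [] else [c])).filter (fun c => !PySem.Chars.isdigit c)
      = if !pvDropSet.contains c && !PySem.Chars.isdigit c then [pvMapTbl.getD c c] else [] := by
  by_cases h1 : c = 'U'
  · subst h1; decide
  by_cases h2 : c = '?'
  · subst h2; decide
  by_cases h3 : c = '-'
  · subst h3; decide
  by_cases h4 : c = '.'
  · subst h4; decide
  by_cases h5 : c = ' '
  · subst h5; decide
  by_cases h6 : c = '\t'
  · subst h6; decide
  have hlist : pvDropSet = ['-', '.', ' ', '\t'] := by decide
  have hmap : pvMapTbl.getD c c = c := by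
    simp [pvMapTbl, PySem.Dict.getD_insert, h1, h2]
  by_cases hd : PySem.Chars.isdigit c = true <;>
    simp [h1, h2, h3, h4, h5, h6, hlist, hmap, hd]

theorem pv_chain (cs : List Char) :
    ((((((cs.flatMap (fun c => if c = 'U' then ['T'] else [c])).flatMap (fun c => if c = '-' then [] else [c])).flatMap
          (fun c => if c = '.' then [] else [c])).flatMap
          (fun c => if c = '?' then ['N'] else [c])).flatMap
          (fun c => if c = ' ' then [] else [c])).flatMap
          (fun c => if c = '\t' then [] else [c])).filter (fun c => !PySem.Chars.isdigit c)
      = (cs.filter (fun c => !pvDropSet.contains c && !PySem.Chars.isdigit c)).map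
          (fun c => pvMapTbl.getD c c) := by
  induction cs with
  | nil => simp
  | cons c t ih =>
    simp only [List.flatMap_cons, List.flatMap_append, List.filter_append]
    rw [pv_step, ih, List.filter_cons]
    by_cases hk : c ∉ pvDropSet ∧ PySem.Chars.isdigit c = false
    · simp [hk]
    · simp [hk]

-- ===== VERDICT (by name: the statement is the Claim_ definition above) =====
theorem normalize_sequence_line_py_spec : Claim_equal_normalize_sequence_line_py := by
  intro line _
  unfold Spec_normalize_sequence_line_py
  simp only [normalize_sequence_line_py, normalize_sequence_line_py_alt]
  apply congrArg (PySem.Str.join "")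
  have hU : ("U" : String).toList = ['U'] := rfl
  have hT : ("T" : String).toList = ['T'] := rfl
  have hdash : ("-" : String).toList = ['-'] := rfl
  have hdot : ("." : String).toList = ['.'] := rfl
  have hq : ("?" : String).toList = ['?'] := rfl
  have hN : ("N" : String).toList = ['N'] := rfl
  have hsp : (" " : String).toList = [' '] := rfl
  have htab : ("\t" : String).toList = ['\t'] := rfl
  have hnil : ("" : String).toList = [] := rfl
  simp only [PySem.Str.toList_replace, hU, hT, hdash, hdot, hq, hN, hsp, htab, hnil,
    pv_replace_single]
  rw [pv_chain, List.map_map]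
  simp [Function.comp_def]
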